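-- pv_equiv track=rewrite | github.com/qtdfdgj/anhao | MKS算法beta2.py | getMks
-- ===== SOURCE A (Python) =====
-- import operator
--
-- def getMks(dictwk):
--     sorted_x=list(sorted(dictwk.items(),key=operator.itemgetter(1)))
--     index=1
--     mks={}
--     for i in range(len(sorted_x)):
--         if(i>0):
--             if(sorted_x[i][1]!=sorted_x[i-1][1]):
--                 index+=1
--         mks.update({sorted_x[i][0]:index})
--     return mks
-- ===== SOURCE B (Python) =====
-- import operator
--
-- def getMks(dictwk):
--     # Dense ranking via a value -> rank table over the distinct sorted values,
--     # then one lookup per item (no adjacent-pair comparisons, no running counter).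
--     rank = {v: i + 1 for i, v in enumerate(sorted(set(dictwk.values())))}
--     return {k: rank[v] for k, v in sorted(dictwk.items(), key=operator.itemgetter(1))}
-- ===== Notes on version B (the rewrite author's own statement) =====
-- stated objective: simpler
-- what changed: B replaces A's stateful scan (running rank counter updated by comparing each sorted item with its predecessor) by a value-to-rank table built once from the enumerated distinct sorted values, each key then mapped by a single lookup.
import Mathlib
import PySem

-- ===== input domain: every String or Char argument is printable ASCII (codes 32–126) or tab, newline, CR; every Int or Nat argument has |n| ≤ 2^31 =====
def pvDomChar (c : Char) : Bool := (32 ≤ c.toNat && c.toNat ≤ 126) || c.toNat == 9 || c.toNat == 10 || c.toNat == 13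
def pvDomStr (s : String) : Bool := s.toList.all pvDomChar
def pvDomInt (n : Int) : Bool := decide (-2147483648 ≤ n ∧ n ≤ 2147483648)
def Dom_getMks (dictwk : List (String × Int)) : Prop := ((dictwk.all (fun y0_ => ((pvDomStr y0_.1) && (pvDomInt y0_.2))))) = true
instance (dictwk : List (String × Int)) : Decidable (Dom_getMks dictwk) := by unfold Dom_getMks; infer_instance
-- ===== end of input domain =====

-- B builds a value→rank table from the enumerated distinct sorted values instead of A's
-- predecessor-comparison scan with a running counter.

-- ===== PORT A =====
-- The loop indexes sorted_x[i] and sorted_x[i-1]; both accesses are always in range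
-- (the i-1 access is guarded by i > 0), so the pyGetD default ("", 0) is unreachable.
def getMks (dictwk : List (String × Int)) : List (String × Int) :=
  let sorted_x := PySem.List.sorted dictwk (fun kv => kv.2)
  (((PySem.List.pyRange 0 (PySem.List.len sorted_x)).foldl
      (fun (st : Int × PySem.Dict String Int) i =>
        let index := if i > 0 then
            (if (PySem.List.pyGetD sorted_x i ("", 0)).2 ≠ (PySem.List.pyGetD sorted_x (i-1) ("", 0)).2
             then st.1 + 1 else st.1)
          else st.1
        (index, st.2.insert (PySem.List.pyGetD sorted_x i ("", 0)).1 index))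
      (1, PySem.Dict.empty)).2).items

-- ===== PORT B =====
-- rank[v] in Source B can never raise KeyError (every looked-up value was put in the table),
-- so the getD default 0 is unreachable.
def getMks_alt (dictwk : List (String × Int)) : List (String × Int) :=
  let rank : PySem.Dict Int Int :=
    (PySem.List.enumerate (PySem.List.sorted (PySem.Set.ofList (dictwk.map (fun kv => kv.2))) id)).foldl
      (fun d iv => d.insert iv.2 (iv.1 + 1)) PySem.Dict.empty
  ((PySem.List.sorted dictwk (fun kv => kv.2)).foldl
      (fun (d : PySem.Dict String Int) kv => d.insert kv.1 ((rank.get? kv.2).getD 0))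
      PySem.Dict.empty).items

-- ===== PRECONDITION & SPEC =====
def Spec_getMks (dictwk : List (String × Int)) (out : List (String × Int)) : Prop := out = getMks_alt dictwk
instance (dictwk : List (String × Int)) (out : List (String × Int)) : Decidable (Spec_getMks dictwk out) := by unfold Spec_getMks; infer_instance

-- ===== CLAIM (what is proved, stated in full; the proofs are below) =====
def Claim_equal_getMks : Prop := ∀ (dictwk : List (String × Int)), Dom_getMks dictwk → Spec_getMks dictwk (getMks dictwk)

-- ===== LEMMAS AND PROOFS =====

-- Structural mirror of A's loop body: state (previous item, running index, dict).
def stepA (st : Option (String × Int) × Int × PySem.Dict String Int) (a : String × Int) :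
    Option (String × Int) × Int × PySem.Dict String Int :=
  let index := match st.1 with
    | none => st.2.1
    | some p => if a.2 ≠ p.2 then st.2.1 + 1 else st.2.1
  (some a, index, st.2.2.insert a.1 index)

lemma prev_foldl_stepA (s : List (String × Int)) :
    ∀ st : Option (String × Int) × Int × PySem.Dict String Int,
      (s.foldl stepA st).1 = s.getLast?.or st.1 := by
  induction s with
  | nil => simp
  | cons a t ih =>
    intro st
    rw [List.foldl_cons, ih]
    cases t with
    | nil => simp [stepA]
    | cons b u =>
      rw [List.getLast?_cons_cons]
      rcases h : (b :: u).getLast? with _ | x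
      · simp [List.getLast?_eq_none_iff] at h
      · simp

-- A's index loop over `range(len(s))` with `s[i]`/`s[i-1]` accesses equals the structural
-- fold of stepA over s.
lemma foldRange_eq_foldStep (s : List (String × Int)) :
    (PySem.List.pyRange 0 (PySem.List.len s)).foldl
      (fun (st : Int × PySem.Dict String Int) i =>
        let index := if i > 0 then
            (if (PySem.List.pyGetD s i ("", 0)).2 ≠ (PySem.List.pyGetD s (i-1) ("", 0)).2
             then st.1 + 1 else st.1)
          else st.1
        (index, st.2.insert (PySem.List.pyGetD s i ("", 0)).1 index))
      (1, PySem.Dict.empty)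
    = (s.foldl stepA (none, 1, PySem.Dict.empty)).2 := by
  induction s using List.reverseRecOn with
  | nil => simp [PySem.List.len, PySem.List.pyRange_one_eq_nil]
  | append_singleton s x ih =>
    have hlen : PySem.List.len (s ++ [x]) = (s.length : Int) + 1 := by
      simp [PySem.List.len]
    have hsplit : PySem.List.pyRange 0 (PySem.List.len (s ++ [x]))
        = PySem.List.pyRange 0 (s.length : Int) ++ [(s.length : Int)] := by
      rw [hlen, PySem.List.pyRange_one_succ_right (by positivity)]
    have hget : ∀ i : Int, 0 ≤ i → i < (s.length : Int) →
        PySem.List.pyGetD (s ++ [x]) i ("", 0) = PySem.List.pyGetD s i ("", 0) := by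
      intro i h0 hi
      obtain ⟨n, rfl⟩ : ∃ n : ℕ, i = (n : Int) := ⟨i.toNat, (Int.toNat_of_nonneg h0).symm⟩
      rw [PySem.List.pyGetD_natCast, PySem.List.pyGetD_natCast]
      have hn : n < s.length := by exact_mod_cast hi
      simp [List.getD, List.getElem?_append_left hn]
    rw [hsplit, List.foldl_append, List.foldl_append]
    have hcong : (PySem.List.pyRange 0 (s.length : Int)).foldl
        (fun (st : Int × PySem.Dict String Int) i =>
          let index := if i > 0 then
              (if (PySem.List.pyGetD (s ++ [x]) i ("", 0)).2 ≠ (PySem.List.pyGetD (s ++ [x]) (i-1) ("", 0)).2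
               then st.1 + 1 else st.1)
            else st.1
          (index, st.2.insert (PySem.List.pyGetD (s ++ [x]) i ("", 0)).1 index))
        (1, PySem.Dict.empty)
        = (PySem.List.pyRange 0 (s.length : Int)).foldl
        (fun (st : Int × PySem.Dict String Int) i =>
          let index := if i > 0 then
              (if (PySem.List.pyGetD s i ("", 0)).2 ≠ (PySem.List.pyGetD s (i-1) ("", 0)).2
               then st.1 + 1 else st.1)
            else st.1
          (index, st.2.insert (PySem.List.pyGetD s i ("", 0)).1 index))
        (1, PySem.Dict.empty) := by
      apply PySem.List.foldl_congr_mem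
      intro acc i hi
      rcases PySem.List.mem_pyRange_one.mp hi with ⟨h0, hlt⟩
      by_cases hpos : i > 0
      · rw [hget i h0 hlt, hget (i-1) (by omega) (by omega)]
      · simp only [hpos, if_false, hget i h0 hlt]
    rw [hcong]
    have hlenrw : PySem.List.len s = (s.length : Int) := by simp [PySem.List.len]
    rw [hlenrw] at ih
    rw [ih]
    -- final step: both sides perform one more step
    simp only [List.foldl_cons, List.foldl_nil]
    have hgetn : PySem.List.pyGetD (s ++ [x]) (s.length : Int) ("", 0) = x := by
      rw [PySem.List.pyGetD_natCast]
      simp [List.getD]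
    have hprev := prev_foldl_stepA s (none, 1, PySem.Dict.empty)
    by_cases hnil : s = []
    · subst hnil
      simp [stepA]
    · have hposn : 0 < s.length := List.length_pos_iff.mpr hnil
      have hpos : ((s.length : Int)) > 0 := by exact_mod_cast hposn
      obtain ⟨lst, hlst⟩ : ∃ lst, s.getLast? = some lst :=
        ⟨s.getLast hnil, List.getLast?_eq_some_getLast hnil⟩
      have hgetp : PySem.List.pyGetD (s ++ [x]) ((s.length : Int) - 1) ("", 0) = lst := by
        have hcast : ((s.length : Int) - 1) = ((s.length - 1 : ℕ) : Int) := by omega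
        rw [hcast, PySem.List.pyGetD_natCast]
        have hlt : s.length - 1 < s.length := by omega
        rw [List.getD_eq_getElem?_getD, List.getElem?_append_left hlt]
        rw [List.getLast?_eq_getElem?] at hlst
        simp [hlst]
      simp only [hgetn, hgetp, if_pos hpos]
      rw [hlst] at hprev
      rcases hst : List.foldl stepA (none, 1, PySem.Dict.empty) s with ⟨p, st2⟩
      rw [hst] at hprev
      simp at hprev
      subst hprev
      simp [stepA]

lemma countP_le_split (x : Int) (l : List Int) :
    l.countP (fun z => z ≤ x) = l.countP (fun z => z < x) + l.count x := by
  induction l with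
  | nil => simp
  | cons a t ih =>
    simp only [List.countP_cons, List.count_cons, ih]
    rcases lt_trichotomy a x with h | h | h
    · simp [le_of_lt h, h, ne_of_lt h]; omega
    · subst h; simp; omega
    · simp [not_le.mpr h, not_lt.mpr (le_of_lt h)]; omega

lemma idxOf_eq_countP (d : List Int) (hd : d.Pairwise (· < ·)) (v : Int) (hv : v ∈ d) :
    List.idxOf v d = d.countP (fun z => z < v) := by
  induction d with
  | nil => simp at hv
  | cons h t ih =>
    rcases List.pairwise_cons.mp hd with ⟨hall, ht⟩
    rcases List.mem_cons.mp hv with rfl | hv'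
    · rw [List.idxOf_cons_self]
      have : t.countP (fun z => z < v) = 0 :=
        List.countP_eq_zero.mpr (fun a ha => by simp [not_lt.mpr (le_of_lt (hall a ha))])
      simp [this]
    · have hlt : h < v := hall v hv'
      rw [List.idxOf_cons, List.countP_cons]
      have hne : (h == v) = false := by simp [ne_of_lt hlt]
      simp [hne, hlt, ih ht hv']

lemma dedup_pairwise_lt (l : List Int) (hl : l.Pairwise (· ≤ ·)) :
    l.dedup.Pairwise (· < ·) := by
  have h1 : l.dedup.Pairwise (· ≤ ·) := hl.sublist (List.dedup_sublist l)
  have h2 : l.dedup.Pairwise (· ≠ ·) := l.nodup_dedup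
  exact (h1.and h2).imp (fun h => lt_of_le_of_ne h.1 h.2)

lemma head_idx (l : List Int) (hl : l.Pairwise (· ≤ ·)) (h0 : 0 < l.length) :
    List.idxOf (l[0]'h0) l.dedup = 0 := by
  rw [idxOf_eq_countP _ (dedup_pairwise_lt l hl) _ (List.mem_dedup.mpr (l.getElem_mem h0))]
  refine List.countP_eq_zero.mpr (fun a ha => ?_)
  rcases List.mem_iff_getElem.mp (List.mem_dedup.mp ha) with ⟨j, hj, rfl⟩
  rcases Nat.eq_zero_or_pos j with rfl | hjp
  · simp
  · have := List.pairwise_iff_getElem.mp hl 0 j h0 hj hjp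
    simp [not_lt.mpr this]

-- In a nondecreasing list, a strict step between neighbours advances the dense rank by one.
lemma adj_idx (l : List Int) (hl : l.Pairwise (· ≤ ·)) {i : ℕ} (h1 : i + 1 < l.length)
    (hne : l[i]'(by omega) ≠ l[i+1]) :
    List.idxOf (l[i+1]) l.dedup = List.idxOf (l[i]'(by omega)) l.dedup + 1 := by
  have hi : i < l.length := by omega
  set x := l[i]'hi with hx
  set y := l[i+1]'h1 with hy
  have hxy : x < y :=
    lt_of_le_of_ne (List.pairwise_iff_getElem.mp hl i (i+1) hi h1 (by omega)) hne
  have hD : l.dedup.Pairwise (· < ·) := dedup_pairwise_lt l hl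
  have hxm : x ∈ l.dedup := List.mem_dedup.mpr (List.getElem_mem hi)
  have hym : y ∈ l.dedup := List.mem_dedup.mpr (List.getElem_mem h1)
  rw [idxOf_eq_countP _ hD _ hym, idxOf_eq_countP _ hD _ hxm]
  have hsplit : ∀ z ∈ l.dedup, z ≤ x ∨ y ≤ z := by
    intro z hz
    rcases List.mem_iff_getElem.mp (List.mem_dedup.mp hz) with ⟨j, hj, rfl⟩
    rcases le_or_gt j i with hji | hji
    · left
      rcases Nat.eq_or_lt_of_le hji with rfl | hji'
      · exact le_refl _
      · exact List.pairwise_iff_getElem.mp hl j i hj hi hji'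
    · right
      rcases Nat.eq_or_lt_of_le hji with h | h
      · subst h; exact le_refl _
      · exact List.pairwise_iff_getElem.mp hl (i+1) j h1 hj h
  have hcong : l.dedup.countP (fun z => z < y) = l.dedup.countP (fun z => z ≤ x) := by
    refine List.countP_congr (fun z hz => ?_)
    rcases hsplit z hz with h | h <;> simp <;> omega
  rw [hcong, countP_le_split, List.count_eq_one_of_mem l.nodup_dedup hxm]

-- Walking the sorted list with A's counter produces exactly the dense rank of each value.
lemma foldStep_eq (D : List Int) (s : List (String × Int)) :
    ∀ (pv : String × Int) (index : Int) (mks : PySem.Dict String Int),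
      index = (List.idxOf pv.2 D : Int) + 1 →
      List.IsChain (fun a b => b.2 = a.2 ∨ List.idxOf b.2 D = List.idxOf a.2 D + 1) (pv :: s) →
      (s.foldl stepA (some pv, index, mks)).2.2 =
        s.foldl (fun d a => d.insert a.1 ((List.idxOf a.2 D : Int) + 1)) mks := by
  induction s with
  | nil => intros; rfl
  | cons a t ih =>
    intro pv index mks hidx hch
    rcases List.isChain_cons_cons.mp hch with ⟨hrel, hch'⟩
    have hstep : stepA (some pv, index, mks) a
        = (some a, (List.idxOf a.2 D : Int) + 1, mks.insert a.1 ((List.idxOf a.2 D : Int) + 1)) := by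
      rcases hrel with heq | hsucc
      · simp [stepA, heq, hidx]
      · have hne : a.2 ≠ pv.2 := by
          intro h
          rw [h] at hsucc
          omega
        simp [stepA, hne, hidx, hsucc]
    rw [List.foldl_cons, hstep, List.foldl_cons, ih _ _ _ rfl hch']

-- The value→rank dict built from the enumerated distinct values answers idxOf + 1.
lemma rank_get (d : List Int) (hnd : d.Nodup) :
    ∀ (k : Int) (m : PySem.Dict Int Int) (v : Int),
      ((PySem.List.enumerate d k).foldl (fun acc iv => acc.insert iv.2 (iv.1 + 1)) m).get? v
        = if v ∈ d then some (k + (List.idxOf v d : Int) + 1) else m.get? v := by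
  induction d with
  | nil => intro k m v; simp [PySem.List.enumerate]
  | cons a t ih =>
    intro k m v
    rcases List.nodup_cons.mp hnd with ⟨hna, hnt⟩
    rw [PySem.List.enumerate_cons, List.foldl_cons, ih hnt]
    by_cases hv : v ∈ t
    · have hva : v ≠ a := fun h => hna (h ▸ hv)
      have hbe : (a == v) = false := beq_eq_false_iff_ne.mpr (fun h => hva h.symm)
      simp [hv, hva, List.idxOf_cons, hbe]
      ring
    · by_cases hva : v = a
      · subst hva
        simp [hv, PySem.Dict.get?_insert_self, List.idxOf_cons_self]
      · have hbe : (a == v) = false := beq_eq_false_iff_ne.mpr (fun h => hva h.symm)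
        rw [PySem.Dict.get?_insert]
        simp [hv, hva]

-- B's sorted distinct-value list is the dedup of the sorted value sequence.
lemma sortedSet_eq_dedup (dictwk : List (String × Int)) :
    PySem.List.sorted (PySem.Set.ofList (dictwk.map (fun kv => kv.2))) id
      = ((PySem.List.sorted dictwk (fun kv => kv.2)).map (fun kv => kv.2)).dedup := by
  apply PySem.List.sorted_eq_of_perm_of_pairwise_lt
  · rw [List.perm_ext_iff_of_nodup (List.nodup_dedup _) (PySem.Set.nodup_ofList _)]
    intro a
    rw [List.mem_dedup, PySem.Set.mem_ofList]
    exact ((PySem.List.sorted_perm dictwk (fun kv => kv.2) false).map (fun kv => kv.2)).mem_iff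
  · have h1 : (((PySem.List.sorted dictwk (fun kv => kv.2)).map (fun kv => kv.2)) :
        List Int).Pairwise (· ≤ ·) := by
      rw [List.pairwise_map]
      exact PySem.List.sorted_pairwise dictwk (fun kv => kv.2)
    have h2 : (((PySem.List.sorted dictwk (fun kv => kv.2)).map (fun kv => kv.2)) :
        List Int).dedup.Pairwise (· < ·) := by
      have ha : _ := h1.sublist (List.dedup_sublist _)
      exact (ha.and (List.nodup_dedup _)).imp (fun h => lt_of_le_of_ne h.1 h.2)
    exact h2.imp (fun h => h)

-- Both stateful traversals compute the per-item dense rank insert sequence.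
lemma main_both (s : List (String × Int))
    (hsort : ((s.map (fun kv => kv.2)) : List Int).Pairwise (· ≤ ·)) :
    (s.foldl stepA (none, 1, PySem.Dict.empty)).2.2
      = s.foldl (fun d a =>
          d.insert a.1 ((List.idxOf a.2 ((s.map (fun kv => kv.2)).dedup) : Int) + 1))
          PySem.Dict.empty := by
  cases s with
  | nil => rfl
  | cons h t =>
    have hlen0 : 0 < ((h :: t).map (fun kv => kv.2)).length := by simp
    have hhead : List.idxOf h.2 (((h :: t).map (fun kv => kv.2)).dedup) = 0 := by
      have := head_idx ((h :: t).map (fun kv => kv.2)) hsort hlen0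
      simpa using this
    have hch : List.IsChain (fun a b => b.2 = a.2 ∨
        List.idxOf b.2 (((h :: t).map (fun kv => kv.2)).dedup)
          = List.idxOf a.2 (((h :: t).map (fun kv => kv.2)).dedup) + 1) (h :: t) := by
      rw [List.isChain_iff_getElem]
      intro i hi
      have hi' : i + 1 < ((h :: t).map (fun kv => kv.2)).length := by
        simpa using hi
      have hmapget : ∀ (j : ℕ) (hj : j < ((h :: t).map (fun kv => kv.2)).length),
          (((h :: t).map (fun kv => kv.2))[j]'hj) = ((h :: t)[j]'(by simpa using hj)).2 := by
        intro j hj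
        rw [List.getElem_map]
      by_cases he : ((h :: t)[i+1]'hi).2 = ((h :: t)[i]'(by omega)).2
      · exact Or.inl he
      · refine Or.inr ?_
        have hne' : (((h :: t).map (fun kv => kv.2))[i]'(by omega))
            ≠ (((h :: t).map (fun kv => kv.2))[i+1]'hi') := by
          rw [hmapget, hmapget]
          exact fun hx => he hx.symm
        have := adj_idx ((h :: t).map (fun kv => kv.2)) hsort hi' hne'
        rw [hmapget, hmapget] at this
        exact this
    rw [List.foldl_cons, List.foldl_cons]
    have h1 : stepA (none, 1, PySem.Dict.empty) h
        = (some h, 1, PySem.Dict.empty.insert h.1 1) := rfl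
    rw [h1, foldStep_eq _ _ _ _ _ (by rw [hhead]; simp) hch, hhead]
    simp

-- ===== VERDICT (by name: the statement is the Claim_ definition above) =====
theorem getMks_spec : Claim_equal_getMks := by
  intro dictwk _
  unfold Spec_getMks getMks getMks_alt
  simp only []
  rw [foldRange_eq_foldStep, sortedSet_eq_dedup]
  have hsort : (((PySem.List.sorted dictwk (fun kv => kv.2)).map (fun kv => kv.2)) :
      List Int).Pairwise (· ≤ ·) := by
    rw [List.pairwise_map]
    exact PySem.List.sorted_pairwise dictwk (fun kv => kv.2)
  rw [main_both _ hsort]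
  congr 1
  apply PySem.List.foldl_congr_mem
  intro d kv hkv
  have hmem : kv.2 ∈ ((PySem.List.sorted dictwk (fun kv => kv.2)).map (fun kv => kv.2)).dedup :=
    List.mem_dedup.mpr (List.mem_map.mpr ⟨kv, hkv, rfl⟩)
  rw [rank_get _ (List.nodup_dedup _) 0 _ kv.2]
  simp [hmem]
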